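-- pv_equiv track=rewrite | github.com/trung-hn/leetcode-solutions | src/667.beautiful-arrangement-ii.py | constructArray
-- ===== SOURCE A (Python) =====
-- from typing import List
--
-- def constructArray(n: int, k: int) -> List[int]:
--     lo = 1
--     hi = lo + k
--     output = []
--     while lo <= hi:
--         output.append(lo)
--         if hi != lo:
--             output.append(hi)
--         lo += 1
--         hi -= 1
--     return output + list(range(k + 2, n + 1))
-- ===== SOURCE B (Python) =====
-- def constructArray(n, k):
--     v = 1
--     out = [v]
--     sign = 1
--     for d in range(k, 0, -1):
--         v += sign * d
--         out.append(v)
--         sign = -sign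
--     out.extend(range(k + 2, n + 1))
--     return out
-- ===== Notes on version B (the rewrite author's own statement) =====
-- stated objective: alternative
-- what changed: Replaces the two converging pointers (lo/hi appended from both ends) by a single running accumulator with an alternating sign that adds the descending differences k, -(k-1), +(k-2), ..., producing the same zigzag prefix left to right.
-- outside the precondition, e.g. on constructArray(5, -3): A returns [-1, 0, 1, 2, 3, 4, 5], B returns [1, -1, 0, 1, 2, 3, 4, 5]
import Mathlib
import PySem

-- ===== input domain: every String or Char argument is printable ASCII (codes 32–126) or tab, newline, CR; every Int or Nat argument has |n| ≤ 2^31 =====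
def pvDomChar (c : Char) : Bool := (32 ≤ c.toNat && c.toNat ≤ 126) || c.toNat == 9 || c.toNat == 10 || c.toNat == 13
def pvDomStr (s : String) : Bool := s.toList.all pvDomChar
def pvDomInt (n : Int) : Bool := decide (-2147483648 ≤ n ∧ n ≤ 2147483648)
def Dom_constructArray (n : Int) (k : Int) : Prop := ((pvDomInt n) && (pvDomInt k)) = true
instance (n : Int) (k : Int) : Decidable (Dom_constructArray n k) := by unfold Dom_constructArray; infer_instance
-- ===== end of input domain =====

-- B rebuilds the zigzag prefix with one running value and an alternating sign over the
-- descending differences k, k-1, ..., 1 instead of A's two converging pointers; same cost.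

-- ===== PORT A =====
-- while lo <= hi: append lo; if hi != lo append hi; lo += 1; hi -= 1
def aLoop (lo hi : Int) (acc : List Int) : List Int :=
  if _h : lo ≤ hi then
    aLoop (lo + 1) (hi - 1) (acc ++ [lo] ++ (if hi ≠ lo then [hi] else []))
  else acc
termination_by (hi + 1 - lo).toNat
decreasing_by omega

def constructArray (n : Int) (k : Int) : List Int :=
  aLoop 1 (1 + k) [] ++ PySem.List.pyRange (k + 2) (n + 1) 1

-- ===== PORT B =====
-- state (v, sign, out); for d in range(k, 0, -1): v += sign*d; out.append(v); sign = -sign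
def bStep (s : Int × Int × List Int) (d : Int) : Int × Int × List Int :=
  (s.1 + s.2.1 * d, -s.2.1, s.2.2 ++ [s.1 + s.2.1 * d])

def constructArray_alt (n : Int) (k : Int) : List Int :=
  ((PySem.List.pyRange k 0 (-1)).foldl bStep (1, 1, [1])).2.2
    ++ PySem.List.pyRange (k + 2) (n + 1) 1

-- ===== PRECONDITION & SPEC =====
-- Pre_ excludes k < 0 (outside the problem's stated domain 1 ≤ k < n): there A's converging-pointer
-- loop emits no prefix at all, an artefact of its implementation, while B still emits the seed value 1.
def Pre_constructArray (_n : Int) (k : Int) : Prop := 0 ≤ k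
instance (n : Int) (k : Int) : Decidable (Pre_constructArray n k) := by unfold Pre_constructArray; infer_instance
def pvWitness_constructArray : Int × Int := (5, 2)

def Spec_constructArray (n : Int) (k : Int) (out : List Int) : Prop := out = constructArray_alt n k
instance (n : Int) (k : Int) (out : List Int) : Decidable (Spec_constructArray n k out) := by unfold Spec_constructArray; infer_instance

-- ===== CLAIM (what is proved, stated in full; the proofs are below) =====
def Claim_equal_constructArray : Prop := ∀ (n : Int) (k : Int), Dom_constructArray n k → Pre_constructArray n k → Spec_constructArray n k (constructArray n k)

-- ===== LEMMAS AND PROOFS =====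

-- the outputs B's fold appends after the seed, as a recursion over the difference list
def bGo (ds : List Int) (v s : Int) : List Int :=
  match ds with
  | [] => []
  | d :: ds => (v + s * d) :: bGo ds (v + s * d) (-s)

theorem foldl_bStep_out (ds : List Int) (v s : Int) (out : List Int) :
    ((ds.foldl bStep (v, s, out)).2.2) = out ++ bGo ds v s := by
  induction ds generalizing v s out with
  | nil => simp [bGo]
  | cons d ds ih => simp [List.foldl, bStep, bGo, ih]

theorem aLoop_stop (lo hi : Int) (acc : List Int) (h : ¬ lo ≤ hi) : aLoop lo hi acc = acc := by
  rw [aLoop]; simp [h]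

theorem aLoop_step (lo hi : Int) (acc : List Int) (h : lo ≤ hi) :
    aLoop lo hi acc = aLoop (lo + 1) (hi - 1) (acc ++ [lo] ++ (if hi ≠ lo then [hi] else [])) := by
  rw [aLoop]; simp [h]

theorem aLoop_acc (fuel : Nat) (lo hi : Int) (acc : List Int) (hf : (hi + 1 - lo).toNat ≤ fuel) :
    aLoop lo hi acc = acc ++ aLoop lo hi [] := by
  induction fuel generalizing lo hi acc with
  | zero =>
    have h : ¬ lo ≤ hi := by omega
    rw [aLoop_stop _ _ _ h, aLoop_stop _ _ _ h]; simp
  | succ f ih =>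
    by_cases h : lo ≤ hi
    · rw [aLoop_step _ _ _ h, aLoop_step _ _ _ h,
        ih (lo + 1) (hi - 1) (acc ++ [lo] ++ (if hi ≠ lo then [hi] else [])) (by omega),
        ih (lo + 1) (hi - 1) ([] ++ [lo] ++ (if hi ≠ lo then [hi] else [])) (by omega)]
      simp
    · rw [aLoop_stop _ _ _ h, aLoop_stop _ _ _ h]; simp

theorem main_zig (m : Nat) : ∀ v : Int,
    v :: bGo (PySem.List.pyRange (m : Int) 0 (-1)) v 1 = aLoop v (v + (m : Int)) [] := by
  induction m using Nat.strong_induction_on with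
  | _ m ih =>
    intro v
    match m with
    | 0 =>
      rw [Nat.cast_zero, PySem.List.pyRange_neg_one_eq_nil (by omega),
        aLoop_step _ _ _ (by omega), aLoop_stop _ _ _ (by omega)]
      simp [bGo]
    | 1 =>
      rw [Nat.cast_one, PySem.List.pyRange_neg_one_cons (by omega),
        PySem.List.pyRange_neg_one_eq_nil (by omega),
        aLoop_step _ _ _ (by omega), aLoop_stop _ _ _ (by omega)]
      have h3 : v + (1 : Int) ≠ v := by omega
      simp [h3, bGo]
    | (m + 2) =>
      rw [show ((m + 2 : Nat) : Int) = (m : Int) + 2 by push_cast; ring]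
      rw [PySem.List.pyRange_neg_one_cons (by omega),
        show (m : Int) + 2 - 1 = (m : Int) + 1 by ring,
        PySem.List.pyRange_neg_one_cons (by omega),
        show (m : Int) + 1 - 1 = (m : Int) by ring,
        aLoop_step _ _ _ (by omega),
        aLoop_acc ((v + ((m:Int)+2) - 1 + 1 - (v+1)).toNat) _ _ _ (by omega),
        show v + ((m : Int) + 2) - 1 = (v + 1) + (m : Int) by ring,
        ← ih m (by omega) (v + 1)]
      simp only [bGo]
      rw [show v + 1 * ((m : Int) + 2) = v + ((m : Int) + 2) by ring,
        show v + ((m : Int) + 2) + -1 * ((m : Int) + 1) = v + 1 by ring,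
        show (-(-1 : Int)) = 1 by ring]
      simp [show ((m : Int) + 2) ≠ 0 from by omega]

theorem constructArray_eq_alt (n k : Int) (hk : 0 ≤ k) :
    constructArray n k = constructArray_alt n k := by
  unfold constructArray constructArray_alt
  rw [foldl_bStep_out]
  obtain ⟨m, rfl⟩ : ∃ m : Nat, k = (m : Int) := ⟨k.toNat, by omega⟩
  rw [← main_zig m 1]
  simp

-- ===== VERDICT (by name: the statement is the Claim_ definition above) =====
theorem constructArray_spec : Claim_equal_constructArray := by
  intro n k _ hk
  exact constructArray_eq_alt n k hk
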